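-- pv_equiv track=rewrite | github.com/cmgjn1881/Algorithm | 프로그래머스/0/120896. 한 번만 등장한 문자/한 번만 등장한 문자.py | solution
-- ===== SOURCE A (Python) =====
-- def solution(s):
--     answer = ''
--     dict = {}
--
--     for i in range(len(s)):
--         if s[i] in dict:
--             dict[s[i]] += 1
--         else:
--             dict[s[i]] = 1
--
--     for key, value in dict.items():
--         if value == 1:
--             answer += key
--
--     return ''. join(sorted(answer))
-- ===== SOURCE B (Python) =====
-- def solution(s):
--     t = sorted(s)
--     res = []
--     for i, c in enumerate(t):
--         if (i == 0 or t[i-1] != c) and (i == len(t) - 1 or t[i+1] != c):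
--             res.append(c)
--     return ''.join(res)
-- ===== Notes on version B (the rewrite author's own statement) =====
-- stated objective: alternative
-- what changed: Replaces the dict frequency count plus final sort by sorting first and collecting, in one scan over the sorted list, the characters whose neighbours both differ (run-length singleton detection); no dict and no second sort.
import Mathlib
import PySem

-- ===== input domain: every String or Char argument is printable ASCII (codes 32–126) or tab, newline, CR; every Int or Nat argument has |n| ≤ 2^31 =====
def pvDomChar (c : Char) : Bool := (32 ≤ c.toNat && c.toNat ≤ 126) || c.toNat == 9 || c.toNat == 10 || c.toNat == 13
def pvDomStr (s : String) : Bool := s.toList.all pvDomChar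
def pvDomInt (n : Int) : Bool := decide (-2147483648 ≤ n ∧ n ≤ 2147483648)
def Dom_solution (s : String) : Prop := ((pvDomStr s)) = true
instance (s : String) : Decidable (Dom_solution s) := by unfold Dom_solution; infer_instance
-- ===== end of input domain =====

-- B replaces A's dict frequency count + final sort by sorting first and collecting, in one
-- scan of the sorted list, the characters whose neighbours both differ (singleton runs).

-- ===== PORT A =====
-- A: count occurrences in a dict over range(len(s)), collect keys with value 1, sort, join.
def solution (s : String) : String :=
  let cs := s.toList
  -- for i in range(len(s)): indices are in range, so s[i] is pyGetD with an unreachable default;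
  -- 'dict[s[i]] += 1' reads dict[s[i]], which under the 'in dict' guard equals getD _ 0.
  let d := (PySem.List.pyRange 0 (PySem.Str.len s) 1).foldl
    (fun (d : PySem.Dict Char Int) i =>
      let c := PySem.List.pyGetD cs i ' '
      if d.contains c then d.insert c (d.getD c 0 + 1) else d.insert c 1)
    PySem.Dict.empty
  -- answer is a Python string built by 'answer += key'; kept as List Char, joined at the end
  let answer := d.items.foldl (fun (acc : List Char) kv => if kv.2 = 1 then acc ++ [kv.1] else acc) []
  String.ofList (PySem.List.sorted answer (fun c => c) false)

-- ===== PORT B =====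
-- B: t = sorted(s); keep t[i] iff both neighbours (out of range = different) differ from t[i].
def solution_alt (s : String) : String :=
  let t := PySem.List.sorted s.toList (fun c => c) false
  -- Python's 'or' short-circuits, so t[i-1]/t[i+1] are only read in range; the pyGetD default
  -- sits behind a true left disjunct and is unreachable.
  let res := (PySem.List.enumerate t 0).foldl
    (fun (acc : List Char) ic =>
      if (ic.1 = 0 ∨ PySem.List.pyGetD t (ic.1 - 1) ic.2 ≠ ic.2) ∧
         (ic.1 = (t.length : Int) - 1 ∨ PySem.List.pyGetD t (ic.1 + 1) ic.2 ≠ ic.2)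
      then acc ++ [ic.2] else acc) []
  String.ofList res

-- ===== PRECONDITION & SPEC =====
def Spec_solution (s : String) (out : String) : Prop := out = solution_alt s
instance (s : String) (out : String) : Decidable (Spec_solution s out) := by unfold Spec_solution; infer_instance

-- ===== CLAIM (what is proved, stated in full; the proofs are below) =====
def Claim_equal_solution : Prop := ∀ (s : String), Dom_solution s → Spec_solution s (solution s)

-- ===== LEMMAS AND PROOFS =====

-- A's counting step is the insert/getD+1 counter step.
lemma stepA_eq (d : PySem.Dict Char Int) (c : Char) :
    (if d.contains c then d.insert c (d.getD c 0 + 1) else d.insert c 1) =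
      d.insert c (d.getD c 0 + 1) := by
  by_cases h : d.contains c = true
  · simp [h]
  · have h0 : d.getD c 0 = 0 := by
      rw [PySem.Dict.getD_of_not_contains]; simpa using h
    simp [h, h0]

-- the counting loop builds Counter(s)
lemma countA (cs : List Char) :
    cs.foldl (fun (d : PySem.Dict Char Int) c =>
        if d.contains c then d.insert c (d.getD c 0 + 1) else d.insert c 1) PySem.Dict.empty =
      PySem.Dict.counter cs := by
  have h := PySem.List.foldl_congr_mem (l := cs) (init := PySem.Dict.empty)
      (f := fun (d : PySem.Dict Char Int) c =>
        if d.contains c then d.insert c (d.getD c 0 + 1) else d.insert c 1)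
      (g := fun (d : PySem.Dict Char Int) c => d.insert c (d.getD c 0 + 1))
      (fun acc x _ => stepA_eq acc x)
  exact h.trans (PySem.Dict.foldl_insert_getD_add_one_eq_counter cs)

-- A's result, characterised.
lemma solution_eq (s : String) :
    solution s = String.ofList (PySem.List.sorted
      ((PySem.Set.ofList s.toList).filter (fun c => decide (s.toList.count c = 1)))
      (fun c => c) false) := by
  simp only [solution, PySem.Str.len_eq]
  rw [PySem.List.foldl_pyRange_zero_pyGetD' s.toList ' '
    (fun (d : PySem.Dict Char Int) c => if d.contains c then d.insert c (d.getD c 0 + 1) else d.insert c 1)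
    PySem.Dict.empty]
  rw [countA, PySem.Dict.items_counter]
  rw [PySem.List.foldl_append_ite (p := fun kv : Char × Int => kv.2 = 1) (f := Prod.fst)]
  rw [List.filter_map, List.map_map]
  simp [Function.comp_def, Nat.cast_eq_one]

-- left neighbour differs ↔ no copy of t[k] before position k (t sorted)
lemma left_iff (t : List Char) (ht : t.Pairwise (· ≤ ·)) (k : Nat) (hk : k < t.length) :
    (((k : Int) = 0 ∨ PySem.List.pyGetD t ((k : Int) - 1) t[k] ≠ t[k]) ↔
      (t.take k).count t[k] = 0) := by
  rw [List.pairwise_iff_getElem] at ht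
  match k with
  | 0 => simp
  | j + 1 =>
    have hj : j < t.length := by omega
    have hget : PySem.List.pyGetD t ((↑(j + 1) : Int) - 1) t[j+1] = t[j] := by
      have : ((↑(j + 1) : Int) - 1) = ((j : Nat) : Int) := by push_cast; ring
      rw [this, PySem.List.pyGetD_natCast, List.getD_eq_getElem?_getD, List.getElem?_eq_getElem hj]
      rfl
    rw [hget]
    constructor
    · rintro (h0 | hne)
      · omega
      · rw [List.count_eq_zero]
        intro hmem
        obtain ⟨i, hi, hieq⟩ := List.mem_iff_getElem.mp hmem
        simp only [List.length_take] at hi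
        have hil : i < j + 1 := by omega
        rw [List.getElem_take] at hieq
        have hij : t[i]'(by omega) ≤ t[j] := by
          rcases Nat.lt_or_ge i j with h | h
          · exact ht i j (by omega) hj h
          · have hij' : i = j := by omega
            subst hij'; exact le_refl _
        have hjk : t[j] < t[j+1] := lt_of_le_of_ne (ht j (j+1) hj hk (by omega)) hne
        exact absurd hieq (ne_of_lt (lt_of_le_of_lt hij hjk))
    · intro hcnt
      right
      intro heq
      have hmem : t[j] ∈ t.take (j+1) := by
        have : (t.take (j+1))[j]'(by simp [List.length_take]; omega) = t[j] := List.getElem_take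
        rw [← this]; exact List.getElem_mem _
      rw [List.count_eq_zero] at hcnt
      exact hcnt (heq ▸ hmem)

-- right neighbour differs ↔ no copy of t[k] after position k (t sorted)
lemma right_iff (t : List Char) (ht : t.Pairwise (· ≤ ·)) (k : Nat) (hk : k < t.length) :
    (((k : Int) = (t.length : Int) - 1 ∨ PySem.List.pyGetD t ((k : Int) + 1) t[k] ≠ t[k]) ↔
      (t.drop (k + 1)).count t[k] = 0) := by
  rw [List.pairwise_iff_getElem] at ht
  rcases Nat.lt_or_ge (k + 1) t.length with hlt | hge
  · have hget : PySem.List.pyGetD t ((k : Int) + 1) t[k] = t[k+1] := by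
      have : ((k : Int) + 1) = ((k + 1 : Nat) : Int) := by push_cast; ring
      rw [this, PySem.List.pyGetD_natCast, List.getD_eq_getElem?_getD, List.getElem?_eq_getElem hlt]
      rfl
    rw [hget]
    constructor
    · rintro (h0 | hne)
      · omega
      · rw [List.count_eq_zero]
        intro hmem
        obtain ⟨i, hi, hieq⟩ := List.mem_iff_getElem.mp hmem
        simp only [List.length_drop] at hi
        rw [List.getElem_drop] at hieq
        have h1 : t[k+1] ≤ t[k+1+i]'(by omega) := by
          rcases Nat.eq_zero_or_pos i with h | h
          · subst h; exact le_refl _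
          · exact ht (k+1) (k+1+i) hlt (by omega) (by omega)
        have hkk : t[k] < t[k+1] := lt_of_le_of_ne (ht k (k+1) hk hlt (by omega)) (Ne.symm hne)
        exact absurd hieq (ne_of_gt (lt_of_lt_of_le hkk h1))
    · intro hcnt
      right
      intro heq
      have hmem : t[k+1] ∈ t.drop (k+1) := by
        have h0 : 0 < (t.drop (k+1)).length := by simp [List.length_drop]; omega
        have : (t.drop (k+1))[0]'h0 = t[k+1] := by rw [List.getElem_drop]
        rw [← this]; exact List.getElem_mem _
      rw [List.count_eq_zero] at hcnt
      exact hcnt (heq ▸ hmem)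
  · have hk1 : k = t.length - 1 := by omega
    have hd : t.drop (k+1) = [] := List.drop_eq_nil_of_le hge
    simp [hd]
    omega

-- in a sorted list, both neighbours differ ↔ the element occurs exactly once
lemma neighbor_iff (t : List Char) (ht : t.Pairwise (· ≤ ·)) (k : Nat) (hk : k < t.length) :
    ((((k : Int) = 0 ∨ PySem.List.pyGetD t ((k : Int) - 1) t[k] ≠ t[k]) ∧
      ((k : Int) = (t.length : Int) - 1 ∨ PySem.List.pyGetD t ((k : Int) + 1) t[k] ≠ t[k])) ↔
      t.count t[k] = 1) := by
  set c := t[k] with hc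
  have hsplit : t = t.take k ++ c :: t.drop (k + 1) := by
    conv_lhs => rw [← List.take_append_drop k t]
    rw [List.drop_eq_getElem_cons hk]
  have hcnt : t.count c = (t.take k).count c + 1 + (t.drop (k+1)).count c := by
    conv_lhs => rw [hsplit]
    simp [List.count_append]
    omega
  rw [left_iff t ht k hk, right_iff t ht k hk, ← hc]
  omega

-- an enumerate-fold keeping elements by a positional test that agrees with p is a filter
lemma enum_fold_filter (q : Int → Char → Prop) [inst : ∀ i c, Decidable (q i c)] (p : Char → Bool) :
    ∀ (t : List Char) (n : Nat) (acc : List Char),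
      (∀ k (hk : k < t.length), q ((n : Int) + k) t[k] ↔ p t[k] = true) →
      (PySem.List.enumerate t (n : Int)).foldl
        (fun acc ic => if q ic.1 ic.2 then acc ++ [ic.2] else acc) acc = acc ++ t.filter p := by
  intro t
  induction t with
  | nil => intro n acc h; simp [PySem.List.enumerate_nil]
  | cons c t ih =>
    intro n acc h
    have h0 : q (n : Int) c ↔ p c = true := by simpa using h 0 (by simp)
    have hrest : ∀ k (hk : k < t.length), q (((n + 1 : Nat) : Int) + k) t[k] ↔ p t[k] = true := by
      intro k hk
      have h' := h (k + 1) (by simpa using Nat.succ_lt_succ hk)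
      simp only [List.getElem_cons_succ] at h'
      have hc : (((n + 1 : Nat) : Int) + (k : Int)) = ((n : Int) + ((k + 1 : Nat) : Int)) := by push_cast; ring
      rw [hc]
      exact h'
    have hcons : PySem.List.enumerate (c :: t) (n : Int) = ((n : Int), c) :: PySem.List.enumerate t (((n+1 : Nat) : Int)) := by
      rw [PySem.List.enumerate_cons]; push_cast; ring_nf
    rw [hcons, List.foldl_cons]
    by_cases hp : p c = true
    · rw [if_pos (h0.mpr hp), List.filter_cons_of_pos hp, ih (n+1) (acc ++ [c]) hrest]
      simp
    · rw [if_neg (fun hq => hp (h0.mp hq)), List.filter_cons_of_neg (by simpa using hp),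
        ih (n+1) acc hrest]

-- B's result, characterised.
lemma solution_alt_eq (s : String) :
    solution_alt s = String.ofList ((PySem.List.sorted s.toList (fun c => c) false).filter
      (fun c => decide (s.toList.count c = 1))) := by
  simp only [solution_alt]
  congr 1
  have hperm := PySem.List.sorted_perm s.toList (fun c => c) false
  set t := PySem.List.sorted s.toList (fun c => c) false with hts
  have ht : t.Pairwise (· ≤ ·) := PySem.List.sorted_pairwise s.toList (fun c => c)
  have h := enum_fold_filter
    (q := fun i c => (i = 0 ∨ PySem.List.pyGetD t (i - 1) c ≠ c) ∧
        (i = (t.length : Int) - 1 ∨ PySem.List.pyGetD t (i + 1) c ≠ c))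
    (p := fun c => decide (t.count c = 1)) t 0 []
    (by
      intro k hk
      simpa using neighbor_iff t ht k hk)
  simp only [Nat.cast_zero] at h
  rw [h]
  simp only [List.nil_append]
  exact List.filter_congr (fun c hc => by simp [List.Perm.count_eq hperm])

-- ===== VERDICT (by name: the statement is the Claim_ definition above) =====
theorem solution_spec : Claim_equal_solution := by
  intro s _
  unfold Spec_solution
  rw [solution_eq, solution_alt_eq]
  congr 1
  have hperm := PySem.List.sorted_perm s.toList (fun c => c) false
  set t := PySem.List.sorted s.toList (fun c => c) false with hts
  have ht : t.Pairwise (· ≤ ·) := PySem.List.sorted_pairwise s.toList (fun c => c)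
  set p : Char → Bool := fun c => decide (s.toList.count c = 1) with hp
  have hnodup_ys : (t.filter p).Nodup := by
    rw [List.nodup_iff_count_le_one]
    intro a
    by_cases ha : p a = true
    · calc (t.filter p).count a ≤ t.count a := List.Sublist.count_le a List.filter_sublist
        _ = s.toList.count a := hperm.count_eq a
        _ ≤ 1 := by simp [hp] at ha; omega
    · have hnm : a ∉ t.filter p := fun hmem => ha (List.of_mem_filter hmem)
      simp [List.count_eq_zero.mpr hnm]
  have hnodup_xs : ((PySem.Set.ofList s.toList).filter (fun c => decide (s.toList.count c = 1))).Nodup :=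
    (PySem.Set.nodup_ofList s.toList).filter _
  have hmem : ∀ a, a ∈ t.filter p ↔ a ∈ (PySem.Set.ofList s.toList).filter (fun c => decide (s.toList.count c = 1)) := by
    intro a
    simp only [List.mem_filter, hp]
    constructor
    · rintro ⟨hat, hc⟩
      refine ⟨?_, hc⟩
      have : a ∈ s.toList := hperm.mem_iff.mp hat
      simpa [PySem.Set.mem_ofList] using this
    · rintro ⟨hat, hc⟩
      refine ⟨?_, hc⟩
      have : a ∈ s.toList := by simpa [PySem.Set.mem_ofList] using hat
      exact hperm.mem_iff.mpr this
  have hperm2 : (t.filter p).Perm ((PySem.Set.ofList s.toList).filter (fun c => decide (s.toList.count c = 1))) :=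
    (List.perm_ext_iff_of_nodup hnodup_ys hnodup_xs).mpr hmem
  have hpw : (t.filter p).Pairwise (fun a b => a < b) := by
    have hle : (t.filter p).Pairwise (· ≤ ·) := List.Pairwise.sublist List.filter_sublist ht
    have hne : (t.filter p).Pairwise (· ≠ ·) := hnodup_ys
    exact (hle.and hne).imp (fun h => lt_of_le_of_ne h.1 h.2)
  exact PySem.List.sorted_eq_of_perm_of_pairwise_lt _ _ (fun c : Char => c) hperm2 hpw
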